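-- pv_equiv track=rewrite | github.com/eniac/tpprof | lib/subsequencing.py | merge_stable
-- ===== SOURCE A (Python) =====
-- import math
-- from operator import itemgetter
--
-- def merge_stable(substring_freq, substring_coverage):
--     merged_freq = dict()
--     merged_coverage = dict()
--
--     # merge substrings of the form ABBA, ABBBA, ABBBBBA -> AB[O(1)]A
--     # note that ABA -> AB[O(0)]
--     for key, value in substring_freq.items():
--         new_key = []
--         current = key[0]
--         count = 1
--
--         for i in range(1, len(key)):
--             if (key[i] == current):
--                 count += 1
--             else:
--                 new_key.append((current, int(math.ceil(math.log10(count)))))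
--                 current = key[i]
--                 count = 1
--
--         new_key.append((current, int(math.ceil(math.log10(count)))))
--
--         hashable_new_key = tuple(new_key)
--         if hashable_new_key not in merged_freq:
--             merged_freq[hashable_new_key] = value
--             merged_coverage[hashable_new_key] = substring_coverage[key]
--         else:
--             merged_freq[hashable_new_key] += value
--             merged_coverage[hashable_new_key].extend(substring_coverage[key])
--
--     # converts from a list of coverages to a single number representing the
--     # number of unique states covered
--     coverage_sum = dict()
--     for key, range_list in merged_coverage.items():
--         range_list = sorted(range_list, key=itemgetter(0))
--         prev_end = -1
--         total = 0
--         for start, end in range_list: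
--             if start > prev_end:
--                 total += (end - start + 1)
--             else:
--                 total += (end - prev_end)
--             prev_end = end
--
--         coverage_sum[key] = total
--
--     return merged_freq, coverage_sum
-- ===== SOURCE B (Python) =====
-- # Alternative re-implementation: head-run-peeling recursion (takewhile) for the RLE
-- # signature instead of A's run-tracking accumulator loop, one combined dict holding
-- # (freq, coverage-list) pairs instead of two parallel branch-updated dicts, and a
-- # closed arithmetic zip/sum formula for the coverage total instead of A's sweep with
-- # prev_end/total state. Return-value equivalence only: A extends the input coverage
-- # lists in place via aliased references; B never mutates its arguments.
-- import math
-- from itertools import takewhile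
-- from operator import itemgetter
--
--
-- def _signature(key):
--     # run-length signature by peeling the head run recursively
--     if not key:
--         return ()
--     run = 1 + len(list(takewhile(lambda c: c == key[0], key[1:])))
--     return ((key[0], int(math.ceil(math.log10(run)))),) + _signature(key[run:])
--
--
-- def _coverage_total(ranges):
--     rl = sorted(ranges, key=itemgetter(0))
--     ends = [-1] + [e for _, e in rl]
--     return sum(e - max(s - 1, pe) for (s, e), pe in zip(rl, ends))
--
--
-- def merge_stable(substring_freq, substring_coverage):
--     merged = {}
--     for key, value in substring_freq.items():
--         nk = _signature(key)
--         f, cov = merged.get(nk, (0, []))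
--         merged[nk] = (f + value, cov + substring_coverage[key])
--     return ({nk: f for nk, (f, _) in merged.items()},
--             {nk: _coverage_total(cov) for nk, (_, cov) in merged.items()})
-- ===== Notes on version B (the rewrite author's own statement) =====
-- stated objective: alternative
-- what changed: The RLE signature is computed by recursive head-run peeling with takewhile instead of A's single-pass current/count accumulator loop; aggregation uses one combined dict of (freq, coverage-list) pairs projected by two final comprehensions instead of A's two parallel dicts updated through a membership branch; and the coverage total is the closed zip/sum formula sum(e - max(s-1, prev_e)) over the sorted list zipped with its shifted ends instead of A's stateful prev_end/total sweep; B also does not mutate the input coverage lists, while A extends them in place via aliased references.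
import Mathlib
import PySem

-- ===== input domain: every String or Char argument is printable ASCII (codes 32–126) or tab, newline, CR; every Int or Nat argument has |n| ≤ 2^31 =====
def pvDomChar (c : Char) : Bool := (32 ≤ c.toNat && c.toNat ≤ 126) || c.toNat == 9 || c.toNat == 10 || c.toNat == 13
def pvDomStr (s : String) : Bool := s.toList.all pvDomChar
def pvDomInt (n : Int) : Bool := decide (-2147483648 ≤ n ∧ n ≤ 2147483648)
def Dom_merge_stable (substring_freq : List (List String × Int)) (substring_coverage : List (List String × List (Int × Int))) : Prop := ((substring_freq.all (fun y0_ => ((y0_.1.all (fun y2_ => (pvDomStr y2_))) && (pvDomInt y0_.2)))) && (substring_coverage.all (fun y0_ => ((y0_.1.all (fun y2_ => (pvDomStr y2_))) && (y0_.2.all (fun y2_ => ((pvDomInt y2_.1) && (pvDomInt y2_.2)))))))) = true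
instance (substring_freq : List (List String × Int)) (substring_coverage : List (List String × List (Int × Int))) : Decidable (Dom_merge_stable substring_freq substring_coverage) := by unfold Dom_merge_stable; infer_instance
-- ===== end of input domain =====

-- B replaces A's run-tracking RLE loop with head-run-peeling recursion, A's two parallel
-- branch-updated dicts with one combined dict of (freq, coverage) pairs, and A's prev_end/total
-- coverage sweep with a closed zip/sum formula (alternative; same cost). Return-value equivalence
-- only: A extends the input coverage lists in place via aliased references, B never mutates them.

-- ===== PORT A =====
-- exact integer value of int(math.ceil(math.log10(n))) for run lengths n ≥ 1 (used by both ports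
-- as the port of that library call; exact on the domain — run lengths are list lengths ≤ 2^31)
def pvCeilLog10 : Nat → Int
  | 0 => 0
  | 1 => 0
  | (n+2) => 1 + pvCeilLog10 ((n + 11) / 10)
decreasing_by omega

def merge_stable (substring_freq : List (List String × Int)) (substring_coverage : List (List String × List (Int × Int))) : (List (List (String × Int) × Int)) × (List (List (String × Int) × Int)) :=
  let scD := PySem.Dict.ofList substring_coverage
  let mm := (PySem.Dict.ofList substring_freq).items.foldl (init :=
      ((PySem.Dict.empty : PySem.Dict (List (String × Int)) Int),
       (PySem.Dict.empty : PySem.Dict (List (String × Int)) (List (Int × Int))))) (fun acc kv =>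
    match kv.1 with
    | [] => acc  -- key[0] raises IndexError here; excluded by Pre_merge_stable
    | k0 :: rest =>
      -- current/count/new_key run-tracking loop over key[1:]
      let st := rest.foldl (fun (st : String × Nat × List (String × Int)) ki =>
        if ki == st.1 then (st.1, st.2.1 + 1, st.2.2)
        else (ki, 1, st.2.2 ++ [(st.1, pvCeilLog10 st.2.1)])) (k0, 1, [])
      let nk := st.2.2 ++ [(st.1, pvCeilLog10 st.2.1)]
      if acc.1.contains nk then
        (acc.1.insert nk (acc.1.getD nk 0 + kv.2),      -- merged_freq[nk] += value (key present here)
         acc.2.modify nk [] (· ++ scD.getD kv.1 []))    -- merged_coverage[nk].extend(substring_coverage[key]); getD's [] unreachable under Pre_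
      else
        (acc.1.insert nk kv.2, acc.2.insert nk (scD.getD kv.1 [])))
  let cs := mm.2.items.foldl (init := (PySem.Dict.empty : PySem.Dict (List (String × Int)) Int)) (fun cs kr =>
    let rl := PySem.List.sorted kr.2 (fun p => p.1) false
    let st := rl.foldl (fun (st : Int × Int) se =>
      (se.2, st.2 + (if se.1 > st.1 then se.2 - se.1 + 1 else se.2 - st.1))) ((-1 : Int), (0 : Int))
    cs.insert kr.1 st.2)
  (mm.1.items, cs.items)

-- ===== PORT B =====
-- port of Source B's _signature: peel the head run (takewhile) and recurse on the rest
def pvSignature : List String → List (String × Int)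
  | [] => []
  | x :: xs =>
    (x, pvCeilLog10 (1 + (xs.takeWhile (fun c => c == x)).length)) ::
      pvSignature (xs.drop (xs.takeWhile (fun c => c == x)).length)
termination_by l => l.length
decreasing_by simp

-- port of Source B's _coverage_total: sorted list zipped with its shifted ends, summed
def pvCoverageTotal (ranges : List (Int × Int)) : Int :=
  let rl := PySem.List.sorted ranges (fun p => p.1) false
  let ends := (-1 : Int) :: rl.map (fun p => p.2)
  ((rl.zip ends).map (fun x => x.1.2 - max (x.1.1 - 1) x.2)).sum

def merge_stable_alt (substring_freq : List (List String × Int)) (substring_coverage : List (List String × List (Int × Int))) : (List (List (String × Int) × Int)) × (List (List (String × Int) × Int)) :=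
  let scD := PySem.Dict.ofList substring_coverage
  let merged := (PySem.Dict.ofList substring_freq).items.foldl (init :=
      (PySem.Dict.empty : PySem.Dict (List (String × Int)) (Int × List (Int × Int)))) (fun m kv =>
    let nk := pvSignature kv.1
    let fc := m.getD nk (0, [])
    m.insert nk (fc.1 + kv.2, fc.2 ++ scD.getD kv.1 []))
  ((PySem.Dict.ofList (merged.items.map (fun p => (p.1, p.2.1)))).items,
   (PySem.Dict.ofList (merged.items.map (fun p => (p.1, pvCoverageTotal p.2.2)))).items)

-- ===== PRECONDITION & SPEC =====
-- Pre_ excludes exactly the inputs on which the Python A raises: an empty key in substring_freq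
-- (key[0] → IndexError) or a freq key missing from substring_coverage (→ KeyError).
def Pre_merge_stable (substring_freq : List (List String × Int)) (substring_coverage : List (List String × List (Int × Int))) : Prop :=
  ∀ p ∈ substring_freq, p.1 ≠ [] ∧ ∃ q ∈ substring_coverage, q.1 = p.1
instance (substring_freq : List (List String × Int)) (substring_coverage : List (List String × List (Int × Int))) : Decidable (Pre_merge_stable substring_freq substring_coverage) := by unfold Pre_merge_stable; infer_instance

def pvWitness_merge_stable : (List (List String × Int)) × (List (List String × List (Int × Int))) :=
  ([(["a", "a", "b"], 2), (["a", "b"], 3)],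
   [(["a", "a", "b"], [(0, 1), (1, 3)]), (["a", "b"], [(5, 6)])])

def Spec_merge_stable (substring_freq : List (List String × Int)) (substring_coverage : List (List String × List (Int × Int))) (out : (List (List (String × Int) × Int)) × (List (List (String × Int) × Int))) : Prop := out = merge_stable_alt substring_freq substring_coverage
instance (substring_freq : List (List String × Int)) (substring_coverage : List (List String × List (Int × Int))) (out : (List (List (String × Int) × Int)) × (List (List (String × Int) × Int))) : Decidable (Spec_merge_stable substring_freq substring_coverage out) := by unfold Spec_merge_stable; infer_instance

-- ===== CLAIM (what is proved, stated in full; the proofs are below) =====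
def Claim_equal_merge_stable : Prop := ∀ (substring_freq : List (List String × Int)) (substring_coverage : List (List String × List (Int × Int))), Dom_merge_stable substring_freq substring_coverage → Pre_merge_stable substring_freq substring_coverage → Spec_merge_stable substring_freq substring_coverage (merge_stable substring_freq substring_coverage)

-- ===== LEMMAS AND PROOFS =====

theorem pvSignature_nil : pvSignature [] = [] := by rw [pvSignature.eq_def]

theorem pvSignature_cons (x : String) (xs : List String) :
    pvSignature (x :: xs) =
    (x, pvCeilLog10 (1 + (xs.takeWhile (fun c => c == x)).length)) ::
      pvSignature (xs.drop (xs.takeWhile (fun c => c == x)).length) := by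
  rw [pvSignature.eq_def]

-- takeWhile (== c) on a run of c's followed by a list not starting with c is exactly the run
theorem takeWhile_replicate_stop (c : String) (l : List String)
    (hl : ∀ h t, l = h :: t → (h == c) = false) :
    ∀ m, (List.replicate m c ++ l).takeWhile (fun d => d == c) = List.replicate m c := by
  intro m
  induction m with
  | zero =>
    rcases l with _ | ⟨h, t⟩
    · simp
    · simp [hl h t rfl]
  | succ k ih =>
    rw [List.replicate_succ, List.cons_append, List.takeWhile]
    simp [ih]

theorem pvSignature_replicate (c : String) (l : List String) (cnt : Nat) (hcnt : 1 ≤ cnt)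
    (hl : ∀ h t, l = h :: t → (h == c) = false) :
    pvSignature (List.replicate cnt c ++ l) = (c, pvCeilLog10 cnt) :: pvSignature l := by
  obtain ⟨m, rfl⟩ : ∃ m, cnt = m + 1 := ⟨cnt - 1, by omega⟩
  rw [List.replicate_succ, List.cons_append, pvSignature_cons,
      takeWhile_replicate_stop c l hl m]
  simp [Nat.add_comm]

-- A's run-tracking loop, finished with the trailing append, is B's head-run-peeling
-- signature of the pending run of `cnt` copies of `cur` followed by the rest of the key
theorem rle_fold (rest : List String) : ∀ (cur : String) (cnt : Nat) (acc : List (String × Int)), 1 ≤ cnt →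
    (let st := rest.foldl (fun (st : String × Nat × List (String × Int)) ki =>
        if ki == st.1 then (st.1, st.2.1 + 1, st.2.2)
        else (ki, 1, st.2.2 ++ [(st.1, pvCeilLog10 st.2.1)])) (cur, cnt, acc)
     st.2.2 ++ [(st.1, pvCeilLog10 st.2.1)])
    = acc ++ pvSignature (List.replicate cnt cur ++ rest) := by
  induction rest with
  | nil =>
    intro cur cnt acc hcnt
    rw [pvSignature_replicate cur [] cnt hcnt (by intro h t ht; simp at ht)]
    simp [pvSignature_nil]
  | cons r rs ih =>
    intro cur cnt acc hcnt
    simp only [List.foldl_cons]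
    by_cases hr : r == cur
    · have hrc : r = cur := by simpa using hr
      subst hrc
      simp only [hr, if_true]
      have := ih r (cnt + 1) acc (by omega)
      simp only [] at this ⊢
      rw [this]
      have hrep : List.replicate cnt r ++ r :: rs = List.replicate (cnt + 1) r ++ rs := by
        rw [List.replicate_succ', List.append_assoc]
        simp
      rw [hrep]
    · simp only [hr, Bool.false_eq_true, if_false]
      have := ih r 1 (acc ++ [(cur, pvCeilLog10 cnt)]) (by omega)
      simp only [] at this ⊢
      rw [this]
      rw [pvSignature_replicate cur (r :: rs) cnt hcnt
        (by intro h t ht; cases ht; simpa using hr)]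
      simp

theorem mem_keys_update {κ ν : Type} [BEq κ] [LawfulBEq κ] (ps : List (κ × ν)) :
    ∀ (d : PySem.Dict κ ν) (k : κ), k ∈ (d.update ps).keys → k ∈ d.keys ∨ k ∈ ps.map Prod.fst := by
  induction ps with
  | nil => intro d k h; exact Or.inl h
  | cons p ps ih =>
    intro d k h
    have h' : k ∈ ((d.insert p.1 p.2).update ps).keys := h
    rcases ih (d.insert p.1 p.2) k h' with h2 | h2
    · rcases (PySem.Dict.mem_keys_insert d p.1 k p.2).mp h2 with h3 | h3
      · exact Or.inr (by simp [h3])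
      · exact Or.inl h3
    · exact Or.inr (by simp [h2])

-- the two merging-loop bodies, named for the proofs
def pvStepA (scD : PySem.Dict (List String) (List (Int × Int)))
    (acc : PySem.Dict (List (String × Int)) Int × PySem.Dict (List (String × Int)) (List (Int × Int)))
    (kv : List String × Int) :
    PySem.Dict (List (String × Int)) Int × PySem.Dict (List (String × Int)) (List (Int × Int)) :=
  match kv.1 with
  | [] => acc
  | k0 :: rest =>
    let st := rest.foldl (fun (st : String × Nat × List (String × Int)) ki =>
      if ki == st.1 then (st.1, st.2.1 + 1, st.2.2)
      else (ki, 1, st.2.2 ++ [(st.1, pvCeilLog10 st.2.1)])) (k0, 1, [])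
    let nk := st.2.2 ++ [(st.1, pvCeilLog10 st.2.1)]
    if acc.1.contains nk then
      (acc.1.insert nk (acc.1.getD nk 0 + kv.2), acc.2.modify nk [] (· ++ scD.getD kv.1 []))
    else
      (acc.1.insert nk kv.2, acc.2.insert nk (scD.getD kv.1 []))

def pvStepB (scD : PySem.Dict (List String) (List (Int × Int)))
    (m : PySem.Dict (List (String × Int)) (Int × List (Int × Int)))
    (kv : List String × Int) :
    PySem.Dict (List (String × Int)) (Int × List (Int × Int)) :=
  let nk := pvSignature kv.1
  let fc := m.getD nk (0, [])
  m.insert nk (fc.1 + kv.2, fc.2 ++ scD.getD kv.1 [])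

theorem merge_stable_def (sf : List (List String × Int)) (sc : List (List String × List (Int × Int))) :
    merge_stable sf sc =
    (((PySem.Dict.ofList sf).items.foldl (pvStepA (PySem.Dict.ofList sc)) (PySem.Dict.empty, PySem.Dict.empty)).1.items,
     ((((PySem.Dict.ofList sf).items.foldl (pvStepA (PySem.Dict.ofList sc)) (PySem.Dict.empty, PySem.Dict.empty)).2.items).foldl
        (fun cs kr => cs.insert kr.1
          ((PySem.List.sorted kr.2 (fun p => p.1) false).foldl (fun (st : Int × Int) se =>
            (se.2, st.2 + (if se.1 > st.1 then se.2 - se.1 + 1 else se.2 - st.1))) ((-1 : Int), (0 : Int))).2)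
        PySem.Dict.empty).items) := rfl

theorem merge_stable_alt_def (sf : List (List String × Int)) (sc : List (List String × List (Int × Int))) :
    merge_stable_alt sf sc =
    (let merged := (PySem.Dict.ofList sf).items.foldl (pvStepB (PySem.Dict.ofList sc)) PySem.Dict.empty
     ((PySem.Dict.ofList (merged.items.map (fun p => (p.1, p.2.1)))).items,
      (PySem.Dict.ofList (merged.items.map (fun p => (p.1, pvCoverageTotal p.2.2)))).items)) := rfl

-- the coupling invariant between A's pair of dicts and B's combined dict
def pvRel (acc : PySem.Dict (List (String × Int)) Int × PySem.Dict (List (String × Int)) (List (Int × Int)))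
    (m : PySem.Dict (List (String × Int)) (Int × List (Int × Int))) : Prop :=
  acc.1.items = m.items.map (fun p => (p.1, p.2.1)) ∧
  acc.2.items = m.items.map (fun p => (p.1, p.2.2)) ∧
  m.keys.Nodup

theorem pvRel_keys1 (acc) (m : PySem.Dict (List (String × Int)) (Int × List (Int × Int)))
    (hR : pvRel acc m) : acc.1.keys = m.keys := by
  show acc.1.items.map Prod.fst = m.items.map Prod.fst
  rw [hR.1, List.map_map]
  rfl

theorem pvRel_keys2 (acc) (m : PySem.Dict (List (String × Int)) (Int × List (Int × Int)))
    (hR : pvRel acc m) : acc.2.keys = m.keys := by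
  show acc.2.items.map Prod.fst = m.items.map Prod.fst
  rw [hR.2.1, List.map_map]
  rfl

theorem pvRel_step (scD : PySem.Dict (List String) (List (Int × Int)))
    (acc : PySem.Dict (List (String × Int)) Int × PySem.Dict (List (String × Int)) (List (Int × Int)))
    (m : PySem.Dict (List (String × Int)) (Int × List (Int × Int)))
    (kv : List String × Int) (hne : kv.1 ≠ []) (hR : pvRel acc m) :
    pvRel (pvStepA scD acc kv) (pvStepB scD m kv) := by
  obtain ⟨key, v⟩ := kv
  cases key with
  | nil => exact absurd rfl hne
  | cons k0 rest =>
    obtain ⟨h1, h2, hnd⟩ := hR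
    have hk1 : acc.1.keys = m.keys := pvRel_keys1 acc m ⟨h1, h2, hnd⟩
    have hk2 : acc.2.keys = m.keys := pvRel_keys2 acc m ⟨h1, h2, hnd⟩
    have hnk := rle_fold rest k0 1 [] (le_refl 1)
    simp only [List.replicate_one, List.singleton_append, List.nil_append] at hnk
    simp only [pvStepA, pvStepB]
    rw [hnk]
    set nk := pvSignature (k0 :: rest) with hnkdef
    set cov := scD.getD (k0 :: rest) [] with hcovdef
    have hc1 : acc.1.contains nk = m.contains nk := by
      rw [PySem.Dict.contains_eq_decide_mem_keys, PySem.Dict.contains_eq_decide_mem_keys, hk1]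
    have hc2 : acc.2.contains nk = m.contains nk := by
      rw [PySem.Dict.contains_eq_decide_mem_keys, PySem.Dict.contains_eq_decide_mem_keys, hk2]
    by_cases hct : m.contains nk = true
    · -- key already merged: A updates both dicts in place, B overwrites the pair in place
      obtain ⟨w, hw⟩ : ∃ w, m.get? nk = some w := by
        have := PySem.Dict.contains_eq_isSome_get? (d := m) (k := nk)
        rw [hct] at this
        exact Option.isSome_iff_exists.mp this.symm
      have hmem : (nk, w) ∈ m.items := PySem.Dict.mem_items_of_get?_eq_some m hw
      have hmgetD : m.getD nk (0, []) = w := PySem.Dict.getD_of_get?_eq_some m ((0 : Int), ([] : List (Int × Int))) hw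
      have hnd1 : acc.1.keys.Nodup := by rw [hk1]; exact hnd
      have hnd2 : acc.2.keys.Nodup := by rw [hk2]; exact hnd
      have hg1 : acc.1.getD nk 0 = w.1 :=
        PySem.Dict.getD_of_mem_items acc.1
          (by rw [h1]; exact List.mem_map.mpr ⟨(nk, w), hmem, rfl⟩) hnd1 0
      have hg2 : acc.2.getD nk [] = w.2 :=
        PySem.Dict.getD_of_mem_items acc.2
          (by rw [h2]; exact List.mem_map.mpr ⟨(nk, w), hmem, rfl⟩) hnd2 []
      rw [if_pos (hc1 ▸ hct)]
      refine ⟨?_, ?_, ?_⟩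
      · dsimp only
        rw [PySem.Dict.items_insert_of_contains _ _ (by rw [hc1]; exact hct),
            PySem.Dict.items_insert_of_contains _ _ hct, h1, hmgetD, hg1,
            List.map_map, List.map_map]
        apply List.map_congr_left
        intro p _
        by_cases hp : p.1 = nk
        · simp [hp]
        · simp [hp]
      · dsimp only
        unfold PySem.Dict.modify
        rw [hg2, PySem.Dict.items_insert_of_contains _ _ (by rw [hc2]; exact hct),
            PySem.Dict.items_insert_of_contains _ _ hct, h2, hmgetD,
            List.map_map, List.map_map]
        apply List.map_congr_left
        intro p _
        by_cases hp : p.1 = nk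
        · simp [hp]
        · simp [hp]
      · rw [PySem.Dict.keys_insert_of_contains _ _ hct]
        exact hnd
    · -- fresh key: both sides append
      have hctf : m.contains nk = false := by simpa using hct
      have hmgetD : m.getD nk (0, []) = (0, []) := PySem.Dict.getD_of_not_contains m ((0 : Int), ([] : List (Int × Int))) hctf
      rw [if_neg (by rw [hc1]; exact hct)]
      refine ⟨?_, ?_, ?_⟩
      · dsimp only
        rw [PySem.Dict.items_insert_of_not_contains _ _ (by rw [hc1]; exact hctf),
            PySem.Dict.items_insert_of_not_contains _ _ hctf, h1, hmgetD]
        simp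
      · dsimp only
        rw [PySem.Dict.items_insert_of_not_contains _ _ (by rw [hc2]; exact hctf),
            PySem.Dict.items_insert_of_not_contains _ _ hctf, h2, hmgetD]
        simp
      · exact PySem.Dict.nodup_keys_insert _ _ _ hnd

theorem pvRel_fold (scD : PySem.Dict (List String) (List (Int × Int))) :
    ∀ (l : List (List String × Int))
      (acc : PySem.Dict (List (String × Int)) Int × PySem.Dict (List (String × Int)) (List (Int × Int)))
      (m : PySem.Dict (List (String × Int)) (Int × List (Int × Int))),
      (∀ kv ∈ l, kv.1 ≠ []) → pvRel acc m →
      pvRel (l.foldl (pvStepA scD) acc) (l.foldl (pvStepB scD) m) := by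
  intro l
  induction l with
  | nil => intro acc m _ h; exact h
  | cons kv t ih =>
    intro acc m hne hR
    simp only [List.foldl_cons]
    exact ih _ _ (fun y hy => hne y (List.mem_cons_of_mem _ hy))
      (pvRel_step scD acc m kv (hne kv List.mem_cons_self) hR)

-- A's prev_end/total sweep equals B's zip/sum formula
theorem sweep_eq_sum (l : List (Int × Int)) : ∀ (p t : Int),
    (l.foldl (fun (st : Int × Int) se =>
      (se.2, st.2 + (if se.1 > st.1 then se.2 - se.1 + 1 else se.2 - st.1))) (p, t)).2
    = t + ((l.zip (p :: l.map (fun q => q.2))).map (fun x => x.1.2 - max (x.1.1 - 1) x.2)).sum := by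
  induction l with
  | nil => intro p t; simp
  | cons se rest ih =>
    intro p t
    simp only [List.foldl_cons, List.map_cons, List.zip_cons_cons, List.sum_cons]
    rw [ih]
    have h : (if se.1 > p then se.2 - se.1 + 1 else se.2 - p) = se.2 - max (se.1 - 1) p := by
      by_cases h : se.1 > p
      · rw [if_pos h, max_eq_left (by omega)]; omega
      · rw [if_neg h, max_eq_right (by omega)]
    rw [h]
    ring

theorem sweep_eq_total (ranges : List (Int × Int)) :
    ((PySem.List.sorted ranges (fun p => p.1) false).foldl (fun (st : Int × Int) se =>
      (se.2, st.2 + (if se.1 > st.1 then se.2 - se.1 + 1 else se.2 - st.1))) ((-1 : Int), (0 : Int))).2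
    = pvCoverageTotal ranges := by
  rw [sweep_eq_sum]
  simp [pvCoverageTotal]

-- ===== VERDICT (by name: the statement is the Claim_ definition above) =====
theorem merge_stable_spec : Claim_equal_merge_stable := by
  intro sf sc _hdom hpre
  unfold Spec_merge_stable
  rw [merge_stable_def, merge_stable_alt_def]
  have hne : ∀ kv ∈ (PySem.Dict.ofList sf).items, kv.1 ≠ [] := by
    intro kv hkv
    have hk : kv.1 ∈ (PySem.Dict.ofList sf).keys := PySem.Dict.mem_keys_of_mem_items _ hkv
    have := mem_keys_update sf PySem.Dict.empty kv.1 hk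
    rw [PySem.Dict.keys_empty] at this
    rcases this with h | h
    · simp at h
    · obtain ⟨p, hp, hp1⟩ := List.mem_map.mp h
      exact hp1 ▸ (hpre p hp).1
  have hR := pvRel_fold (PySem.Dict.ofList sc) (PySem.Dict.ofList sf).items
    (PySem.Dict.empty, PySem.Dict.empty) PySem.Dict.empty hne ⟨rfl, rfl, PySem.Dict.nodup_keys_empty⟩
  set mm := (PySem.Dict.ofList sf).items.foldl (pvStepA (PySem.Dict.ofList sc))
    (PySem.Dict.empty, PySem.Dict.empty) with hmm
  set mg := (PySem.Dict.ofList sf).items.foldl (pvStepB (PySem.Dict.ofList sc))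
    PySem.Dict.empty with hmg
  obtain ⟨h1, h2, hnd⟩ := hR
  have he1 : (PySem.Dict.empty : PySem.Dict (List (String × Int)) Int).items = ([] : List (List (String × Int) × Int)) := rfl
  have hnd1 : (mg.items.map (fun p => (p.1, p.2.1))).map Prod.fst |>.Nodup := by
    rw [List.map_map]; exact hnd
  have hnd2 : (mg.items.map (fun p => (p.1, pvCoverageTotal p.2.2))).map Prod.fst |>.Nodup := by
    rw [List.map_map]; exact hnd
  refine Prod.ext ?_ ?_
  · -- freq components
    show mm.1.items = (PySem.Dict.ofList (mg.items.map (fun p => (p.1, p.2.1)))).items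
    have hOf : PySem.Dict.ofList (mg.items.map (fun p => (p.1, p.2.1)))
        = (mg.items.map (fun p => (p.1, p.2.1))).foldl (fun d a => d.insert a.1 a.2) PySem.Dict.empty := rfl
    rw [h1, hOf, PySem.Dict.items_foldl_insert_fresh _ _ _ _
      (fun a _ => PySem.Dict.contains_empty _) hnd1]
    simp [he1]
  · -- coverage components
    show ((mm.2.items).foldl _ PySem.Dict.empty).items
        = (PySem.Dict.ofList (mg.items.map (fun p => (p.1, pvCoverageTotal p.2.2)))).items
    have hndmm2 : (mm.2.items.map Prod.fst).Nodup := by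
      rw [h2, List.map_map]; exact hnd
    rw [PySem.Dict.items_foldl_insert_fresh mm.2.items (fun kr => kr.1)
      (fun kr => ((PySem.List.sorted kr.2 (fun p => p.1) false).foldl (fun (st : Int × Int) se =>
        (se.2, st.2 + (if se.1 > st.1 then se.2 - se.1 + 1 else se.2 - st.1))) ((-1 : Int), (0 : Int))).2)
      PySem.Dict.empty (fun a _ => PySem.Dict.contains_empty _) hndmm2]
    have hOf : PySem.Dict.ofList (mg.items.map (fun p => (p.1, pvCoverageTotal p.2.2)))
        = (mg.items.map (fun p => (p.1, pvCoverageTotal p.2.2))).foldl (fun d a => d.insert a.1 a.2) PySem.Dict.empty := rfl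
    rw [hOf, PySem.Dict.items_foldl_insert_fresh _ _ _ _
      (fun a _ => PySem.Dict.contains_empty _) hnd2]
    rw [h2]
    simp only [he1, List.nil_append, List.map_map]
    apply List.map_congr_left
    intro p _
    simp [sweep_eq_total]
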